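-- pv_equiv track=rewrite | github.com/tongsh6/pi-proof-forge | tools/infra/persistence/yaml_io.py | _fold_block_scalar_lines
-- ===== SOURCE A (Python) =====
-- def _fold_block_scalar_lines(lines: list[str]) -> str:
--     non_empty_lines = [line for line in lines if line.strip()]
--     if non_empty_lines:
--         min_indent = min(len(line) - len(line.lstrip(" ")) for line in non_empty_lines)
--     else:
--         min_indent = 0
--
--     normalized: list[str] = []
--     for line in lines:
--         if not line.strip():
--             normalized.append("")
--             continue
--         normalized.append(line[min_indent:].rstrip())
--
--     paragraphs: list[str] = []
--     current: list[str] = []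
--     for line in normalized:
--         if not line:
--             if current:
--                 paragraphs.append(" ".join(current))
--                 current = []
--             continue
--         current.append(line)
--     if current:
--         paragraphs.append(" ".join(current))
--
--     return "\n".join(paragraphs)
-- ===== SOURCE B (Python) =====
-- def _fold_block_scalar_lines(lines: list[str]) -> str:
--     min_indent = min((len(l) - len(l.lstrip(" ")) for l in lines if l.strip()), default=0)
--     paragraphs = []
--     i, n = 0, len(lines)
--     while i < n:
--         if not lines[i].strip():
--             i += 1
--             continue
--         j = i
--         while j < n and lines[j].strip():
--             j += 1
--         paragraphs.append(" ".join(l[min_indent:].rstrip() for l in lines[i:j]))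
--         i = j
--     return "\n".join(paragraphs)
-- ===== Notes on version B (the rewrite author's own statement) =====
-- stated objective: alternative
-- what changed: A builds an intermediate normalized list and then runs a flush-on-blank accumulator loop with a trailing flush; B makes a single span scan over the original lines, folding each maximal run of non-blank lines directly into one paragraph (no normalized list, no current/flush state).
import Mathlib
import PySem

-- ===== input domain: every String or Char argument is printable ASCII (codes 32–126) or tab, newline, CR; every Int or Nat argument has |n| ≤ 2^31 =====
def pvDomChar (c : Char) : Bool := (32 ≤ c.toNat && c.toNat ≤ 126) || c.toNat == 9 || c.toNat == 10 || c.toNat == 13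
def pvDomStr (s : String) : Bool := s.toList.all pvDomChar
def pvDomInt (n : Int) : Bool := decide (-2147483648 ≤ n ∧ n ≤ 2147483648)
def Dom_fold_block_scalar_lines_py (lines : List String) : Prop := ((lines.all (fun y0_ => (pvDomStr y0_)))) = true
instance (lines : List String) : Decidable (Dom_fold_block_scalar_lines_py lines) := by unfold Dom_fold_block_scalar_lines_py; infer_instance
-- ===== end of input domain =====

-- B replaces A's normalize-then-accumulate two-loop pipeline by a single span scan that folds each
-- maximal run of non-blank lines into one paragraph directly (objective: alternative decomposition).

-- ===== PORT A =====
-- truthiness of `line.strip()`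
def pyNonblank (l : String) : Bool := !(PySem.Str.strip l == "")
-- len(line) - len(line.lstrip(" ")); lstrip(" ") is ported by hand as dropWhile (· == ' ') — exact
def pyIndent (l : String) : Int := (l.toList.length : Int) - ((l.toList.dropWhile (fun c => c == ' ')).length : Int)
-- line[min_indent:].rstrip()
def pyNorm (mi : Int) (l : String) : String := PySem.Str.rstrip (PySem.Str.slice l (some mi) none)

def fold_block_scalar_lines_py (lines : List String) : String :=
  let non_empty_lines := lines.filter (fun l => pyNonblank l)
  let min_indent : Int :=
    if non_empty_lines.isEmpty then 0
    else (PySem.List.min? (non_empty_lines.map pyIndent) (fun x => x)).getD 0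
  let normalized : List String := lines.foldl
    (fun acc l => if !pyNonblank l then acc ++ [""] else acc ++ [pyNorm min_indent l]) []
  let pc : List String × List String := normalized.foldl
    (fun pc l =>
      if l == "" then (if pc.2.isEmpty then pc else (pc.1 ++ [PySem.Str.join " " pc.2], []))
      else (pc.1, pc.2 ++ [l])) ([], [])
  let paragraphs := if pc.2.isEmpty then pc.1 else pc.1 ++ [PySem.Str.join " " pc.2]
  PySem.Str.join "\n" paragraphs

-- ===== PORT B =====
-- the span scan of Source B: skip a blank line, else take the maximal non-blank run as one paragraph
def altGo (mi : Int) (ls : List String) : List String :=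
  match ls with
  | [] => []
  | l :: rest =>
    if pyNonblank l then
      PySem.Str.join " " (((l :: rest).takeWhile pyNonblank).map (pyNorm mi))
        :: altGo mi ((l :: rest).dropWhile pyNonblank)
    else altGo mi rest
termination_by ls.length
decreasing_by
  · simp only [List.dropWhile_cons, *, List.length_cons]
    exact Nat.lt_succ_of_le (List.length_dropWhile_le _ _)
  · simp

def fold_block_scalar_lines_py_alt (lines : List String) : String :=
  let min_indent : Int := PySem.List.minD ((lines.filter (fun l => pyNonblank l)).map pyIndent) (fun x => x) 0
  PySem.Str.join "\n" (altGo min_indent lines)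

-- ===== PRECONDITION & SPEC =====
def Spec_fold_block_scalar_lines_py (lines : List String) (out : String) : Prop := out = fold_block_scalar_lines_py_alt lines
instance (lines : List String) (out : String) : Decidable (Spec_fold_block_scalar_lines_py lines out) := by unfold Spec_fold_block_scalar_lines_py; infer_instance

-- ===== CLAIM (what is proved, stated in full; the proofs are below) =====
def Claim_equal_fold_block_scalar_lines_py : Prop := ∀ (lines : List String), Dom_fold_block_scalar_lines_py lines → Spec_fold_block_scalar_lines_py lines (fold_block_scalar_lines_py lines)

-- ===== LEMMAS AND PROOFS =====

theorem rstrip_eq_nil_iff (cs : List Char) :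
    PySem.Chars.rstrip cs = [] ↔ ∀ c ∈ cs, PySem.Chars.isspace c = true := by
  simp [PySem.Chars.rstrip, List.dropWhile_eq_nil_iff]

-- a non-blank line normalizes to a non-empty string (0 ≤ mi ≤ its space indent)
theorem pyNorm_ne_empty (l : String) (mi : Int) (h0 : 0 ≤ mi) (hle : mi ≤ pyIndent l)
    (hb : pyNonblank l = true) : (pyNorm mi l == "") = false := by
  have hb' : PySem.Chars.strip l.toList ≠ [] := by
    intro hnil
    simp only [pyNonblank, Bool.not_eq_eq_eq_not, Bool.not_true, beq_eq_false_iff_ne, ne_eq] at hb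
    apply hb
    rw [← String.toList_inj, PySem.Str.toList_strip, hnil]
    rfl
  -- a char of l that is not whitespace
  have hex : ∃ c ∈ l.toList, PySem.Chars.isspace c = false := by
    by_contra hall
    push Not at hall
    apply hb'
    simp only [PySem.Chars.strip, PySem.Chars.lstrip]
    rw [rstrip_eq_nil_iff]
    intro c hc
    have : c ∈ l.toList := (List.dropWhile_sublist _).subset hc
    simpa using hall c this
  obtain ⟨c, hc, hcs⟩ := hex
  obtain ⟨j, hj, hjc⟩ := List.mem_iff_getElem.mp hc
  -- j is at least the leading-space count
  have htw : (l.toList.takeWhile (fun c => c == ' ')).length ≤ j := by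
    by_contra hlt
    push Not at hlt
    have hpre := List.takeWhile_prefix (l := l.toList) (p := fun c => c == ' ')
    have : (l.toList.takeWhile (fun c => c == ' '))[j] = l.toList[j] :=
      List.IsPrefix.getElem hpre hlt
    have hmem : l.toList[j] ∈ l.toList.takeWhile (fun c => c == ' ') := by
      rw [← this]; exact List.getElem_mem _
    have := List.mem_takeWhile_imp hmem
    rw [hjc] at this
    simp only [beq_iff_eq] at this
    rw [this] at hcs
    simp [PySem.Chars.isspace] at hcs
  have hmi : mi.toNat ≤ j := by
    have hlen : (l.toList.takeWhile (fun c => c == ' ')).length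
        + (l.toList.dropWhile (fun c => c == ' ')).length = l.toList.length := by
      rw [← List.length_append, List.takeWhile_append_dropWhile]
    simp only [pyIndent] at hle
    omega
  -- c survives the slice
  have hcdrop : c ∈ l.toList.drop mi.toNat := by
    rw [← hjc]
    have : l.toList[j] = (l.toList.drop mi.toNat)[j - mi.toNat]'(by rw [List.length_drop]; omega) := by
      rw [List.getElem_drop]
      congr 1
      omega
    rw [this]
    exact List.getElem_mem _
  rw [beq_eq_false_iff_ne, ne_eq, ← String.toList_inj]
  simp only [pyNorm, PySem.Str.toList_rstrip, PySem.Str.toList_slice,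
    PySem.Chars.slice_eq_listSlice, PySem.List.slice_from _ h0]
  intro hnil
  have := (rstrip_eq_nil_iff _).mp hnil c hcdrop
  rw [this] at hcs
  simp at hcs

-- proof-side: A's paragraph accumulator with the already-emitted paragraphs factored out front
def parasP (mi : Int) (C : List String) (ls : List String) : List String :=
  match ls with
  | [] => if C.isEmpty then [] else [PySem.Str.join " " C]
  | l :: rest =>
    if pyNonblank l then parasP mi (C ++ [pyNorm mi l]) rest
    else (if C.isEmpty then [] else [PySem.Str.join " " C]) ++ parasP mi [] rest

-- parasP equals B's span scan
theorem parasP_eq_altGo (mi : Int) (ls : List String) :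
    (∀ C, C ≠ [] → parasP mi C ls =
        PySem.Str.join " " (C ++ (ls.takeWhile pyNonblank).map (pyNorm mi))
          :: altGo mi (ls.dropWhile pyNonblank))
    ∧ parasP mi [] ls = altGo mi ls := by
  induction ls with
  | nil =>
    constructor
    · intro C hC
      simp [parasP, altGo, List.isEmpty_iff, hC]
    · simp [parasP, altGo]
  | cons l rest ih =>
    obtain ⟨ih1, ih2⟩ := ih
    by_cases hb : pyNonblank l = true
    · have hstep : ∀ C, parasP mi C (l :: rest) =
          PySem.Str.join " " (C ++ List.map (pyNorm mi) (List.takeWhile pyNonblank (l :: rest)))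
            :: altGo mi (List.dropWhile pyNonblank (l :: rest)) := by
        intro C
        rw [parasP]
        simp only [hb, if_pos, List.takeWhile_cons, List.dropWhile_cons]
        rw [ih1 (C ++ [pyNorm mi l]) (by simp)]
        simp
      refine ⟨fun C _ => hstep C, ?_⟩
      rw [hstep []]
      conv_rhs => rw [altGo.eq_def]
      simp [hb]
    · rw [Bool.not_eq_true] at hb
      constructor
      · intro C hC
        rw [parasP, altGo.eq_def]
        simp only [hb, List.takeWhile_cons, List.dropWhile_cons, Bool.false_eq_true, if_false,
          List.isEmpty_iff, hC]
        rw [ih2]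
        simp
      · rw [parasP, altGo.eq_def]
        simp [hb, ih2]

-- A's accumulator fold equals parasP
theorem foldA_eq_parasP (mi : Int) (ls : List String) (P C : List String)
    (h : ∀ l ∈ ls, pyNonblank l = true → (pyNorm mi l == "") = false) :
    (let pc := (ls.map (fun l => if !pyNonblank l then "" else pyNorm mi l)).foldl
      (fun pc l =>
        if l == "" then (if pc.2.isEmpty then pc else (pc.1 ++ [PySem.Str.join " " pc.2], []))
        else (pc.1, pc.2 ++ [l])) (P, C);
     if pc.2.isEmpty then pc.1 else pc.1 ++ [PySem.Str.join " " pc.2]) = P ++ parasP mi C ls := by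
  induction ls generalizing P C with
  | nil =>
    by_cases hC : C.isEmpty <;> simp [parasP, hC]
  | cons l rest ih =>
    simp only [List.map_cons, List.foldl_cons]
    by_cases hb : pyNonblank l = true
    · simp only [hb, Bool.not_true, Bool.false_eq_true, if_false, h l (by simp) hb]
      rw [ih _ _ (fun x hx => h x (by simp [hx]))]
      simp [parasP, hb]
    · rw [Bool.not_eq_true] at hb
      simp only [hb, Bool.not_false, if_true, BEq.rfl]
      by_cases hC : C.isEmpty
      · rw [List.isEmpty_iff.mp hC]
        simp only [List.isEmpty_nil, if_pos]
        rw [ih _ _ (fun x hx => h x (by simp [hx]))]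
        simp [parasP, hb]
      · simp only [hC, Bool.false_eq_true, if_false]
        rw [ih _ _ (fun x hx => h x (by simp [hx]))]
        simp [parasP, hb, hC, List.append_assoc]

-- ===== VERDICT (by name: the statement is the Claim_ definition above) =====
theorem fold_block_scalar_lines_py_spec : Claim_equal_fold_block_scalar_lines_py := by
  intro lines _
  unfold Spec_fold_block_scalar_lines_py fold_block_scalar_lines_py fold_block_scalar_lines_py_alt
  simp only
  set mB := PySem.List.minD ((lines.filter (fun l => pyNonblank l)).map pyIndent) (fun x => x) 0 with hmB
  have hmin : (if (lines.filter (fun l => pyNonblank l)).isEmpty then (0:Int)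
      else (PySem.List.min? ((lines.filter (fun l => pyNonblank l)).map pyIndent) (fun x => x)).getD 0) = mB := by
    rw [hmB]; unfold PySem.List.minD
    by_cases he : (lines.filter (fun l => pyNonblank l)).isEmpty
    · simp [List.isEmpty_iff.mp he, PySem.List.min?]
    · simp [he]
  rw [hmin]
  -- bounds on mB
  have hbound : ∀ l ∈ lines, pyNonblank l = true → (pyNorm mB l == "") = false := by
    intro l hl hb
    have hmem : pyIndent l ∈ (lines.filter (fun l => pyNonblank l)).map pyIndent :=
      List.mem_map_of_mem (List.mem_filter.mpr ⟨hl, hb⟩)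
    have hne : (lines.filter (fun l => pyNonblank l)).map pyIndent ≠ [] := by
      intro hnil; rw [hnil] at hmem; simp at hmem
    obtain ⟨m, hm⟩ : ∃ m, PySem.List.min? ((lines.filter (fun l => pyNonblank l)).map pyIndent) (fun x => x) = some m := by
      rcases hx : PySem.List.min? ((lines.filter (fun l => pyNonblank l)).map pyIndent) (fun x => x) with _ | m
      · exact absurd ((PySem.List.min?_eq_none_iff _ _).mp hx) hne
      · exact ⟨m, rfl⟩
    have hmBval : mB = m := by rw [hmB]; unfold PySem.List.minD; rw [hm]; rfl
    have hle : mB ≤ pyIndent l := hmBval ▸ PySem.List.min?_id_le hm _ hmem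
    have h0 : 0 ≤ mB := by
      have := PySem.List.min?_mem hm
      obtain ⟨x, _, hx⟩ := List.mem_map.mp this
      have : 0 ≤ pyIndent x := by
        simp only [pyIndent]
        have := List.length_dropWhile_le (fun c => c == ' ') x.toList
        omega
      omega
    exact pyNorm_ne_empty l mB h0 hle hb
  -- normalized as a map
  have hmapfn : (fun (acc : List String) l => if !pyNonblank l then acc ++ [""] else acc ++ [pyNorm mB l])
      = (fun acc l => acc ++ [if !pyNonblank l then "" else pyNorm mB l]) := by
    funext acc l; split <;> rfl
  rw [hmapfn, PySem.List.foldl_append_singleton_eq_map]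
  simp only [List.nil_append]
  have := foldA_eq_parasP mB lines [] []
    (by intro l hl hb; exact hbound l hl hb)
  simp only at this
  rw [this]
  rw [List.nil_append, (parasP_eq_altGo mB lines).2]
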